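-- pv_equiv track=rewrite | github.com/aleserena/metagameAnalyzer | scripts/sync_placeholder_players_from_denorm.py | _pick_winner
-- ===== SOURCE A (Python) =====
-- from collections import Counter
--
-- def _pick_winner(votes: list[str]) -> tuple[str | None, str]:
--     """Return (chosen_name, reason_if_skipped). reason empty when chosen is set."""
--     if not votes:
--         return None, "no non-placeholder names on decks/matchups"
--     ctr = Counter(votes)
--     top_count = ctr.most_common(1)[0][1]
--     winners = sorted(name for name, n in ctr.items() if n == top_count)
--     if len(winners) > 1:
--         return None, f"tie between distinct names ({', '.join(repr(w) for w in winners)})"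
--     return winners[0], ""
-- ===== SOURCE B (Python) =====
-- def _pick_winner(votes: list[str]) -> tuple[str | None, str]:
--     """Return (chosen_name, reason_if_skipped). reason empty when chosen is set."""
--     if not votes:
--         return None, "no non-placeholder names on decks/matchups"
--     s = sorted(votes)
--     # one pass over the sorted list, collecting (name, run_length) for each run of equal names
--     runs = []
--     cur = s[0]
--     cnt = 0
--     for v in s:
--         if v == cur:
--             cnt += 1
--         else:
--             runs.append((cur, cnt))
--             cur, cnt = v, 1
--     runs.append((cur, cnt))
--     best = max(c for _, c in runs)
--     winners = [name for name, c in runs if c == best]  # already in sorted order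
--     if len(winners) > 1:
--         return None, "tie between distinct names ({})".format(", ".join(repr(w) for w in winners))
--     return winners[0], ""
-- ===== Notes on version B (the rewrite author's own statement) =====
-- stated objective: alternative
-- what changed: Replaces the Counter/most_common machinery by sorting the votes and scanning the sorted list once into (name, run-length) runs; the winners are read off the runs with the maximal length and are already in sorted order.
import Mathlib
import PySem

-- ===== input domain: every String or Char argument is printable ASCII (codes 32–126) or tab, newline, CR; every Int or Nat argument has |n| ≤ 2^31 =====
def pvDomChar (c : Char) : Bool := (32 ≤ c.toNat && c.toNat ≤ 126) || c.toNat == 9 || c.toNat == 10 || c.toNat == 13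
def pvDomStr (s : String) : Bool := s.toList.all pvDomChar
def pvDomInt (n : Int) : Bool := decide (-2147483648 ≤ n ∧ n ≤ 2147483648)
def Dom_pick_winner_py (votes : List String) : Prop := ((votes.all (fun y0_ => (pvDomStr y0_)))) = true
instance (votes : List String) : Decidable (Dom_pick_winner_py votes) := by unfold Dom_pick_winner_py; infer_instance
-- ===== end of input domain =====

-- B sorts the votes and scans the sorted list once into (name, run-length) runs instead of building a Counter (alternative decomposition; not claimed faster).
-- Python's repr(str), exact on the input domain (printable ASCII plus tab/newline/CR); used by both Pythons' tie message.
def pyReprChar (q : Char) (c : Char) : List Char :=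
  if c = '\\' then ['\\', '\\']
  else if c = q then ['\\', q]
  else if c = Char.ofNat 9 then ['\\', 't']
  else if c = Char.ofNat 10 then ['\\', 'n']
  else if c = Char.ofNat 13 then ['\\', 'r']
  else [c]

def pyRepr (s : String) : String :=
  let q : Char := if s.toList.contains '\'' && !(s.toList.contains '"') then '"' else '\''
  String.ofList (q :: (s.toList.flatMap (pyReprChar q)) ++ [q])

-- ===== PORT A =====
def pick_winner_py (votes : List String) : Option String × String :=
  if votes = [] then (none, "no non-placeholder names on decks/matchups")
  else
    let ctr := PySem.Dict.counter votes
    let top_count := ((PySem.List.sorted ctr.items (fun p => p.2) true).headD ("", 0)).2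
    let winners := PySem.List.sorted ((ctr.items.filter (fun p => p.2 == top_count)).map Prod.fst) (fun x => x) false
    if winners.length > 1 then
      (none, String.ofList ("tie between distinct names (".toList ++ (PySem.Str.join ", " (winners.map pyRepr)).toList ++ ")".toList))
    else (winners.headD "", "")

-- ===== PORT B =====
-- Source B's "for v in s" loop with state (runs, cur, cnt), as the obvious structural recursion;
-- the trailing runs.append((cur, cnt)) is the base case.
def pvRuns (cur : String) (cnt : Int) : List String → List (String × Int)
  | [] => [(cur, cnt)]
  | v :: rest => if v == cur then pvRuns cur (cnt + 1) rest else (cur, cnt) :: pvRuns v 1 rest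

def pick_winner_py_alt (votes : List String) : Option String × String :=
  if votes = [] then (none, "no non-placeholder names on decks/matchups")
  else
    let s := PySem.List.sorted votes (fun x => x) false
    let runs := pvRuns (s.headD "") 0 s
    let best := (PySem.List.max? (runs.map (fun p => p.2)) (fun y => y)).getD 0
    let winners := (runs.filter (fun p => p.2 == best)).map Prod.fst
    if winners.length > 1 then
      (none, String.ofList ("tie between distinct names (".toList ++ (PySem.Str.join ", " (winners.map pyRepr)).toList ++ ")".toList))
    else (winners.headD "", "")

-- ===== PRECONDITION & SPEC =====
def Spec_pick_winner_py (votes : List String) (out : Option String × String) : Prop := out = pick_winner_py_alt votes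
instance (votes : List String) (out : Option String × String) : Decidable (Spec_pick_winner_py votes out) := by unfold Spec_pick_winner_py; infer_instance

-- ===== CLAIM (what is proved, stated in full; the proofs are below) =====
def Claim_equal_pick_winner_py : Prop := ∀ (votes : List String), Dom_pick_winner_py votes → Spec_pick_winner_py votes (pick_winner_py votes)

-- ===== LEMMAS AND PROOFS =====

-- keys of the runs list are exactly {cur} ∪ elements of the remaining list
theorem mem_keys_pvRuns (l : List String) : ∀ (c : String) (n : Int) (k : String),
    k ∈ (pvRuns c n l).map Prod.fst ↔ k = c ∨ k ∈ l := by
  induction l with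
  | nil => intro c n k; simp [pvRuns]
  | cons v rest ih =>
    intro c n k
    by_cases hv : v = c
    · rw [hv]
      simp only [pvRuns, beq_self_eq_true, if_true]
      rw [ih]
      simp only [List.mem_cons]
      tauto
    · simp only [pvRuns, beq_iff_eq, if_neg hv, List.map_cons, List.mem_cons]
      rw [ih]

theorem pvRuns_ne_nil (l : List String) : ∀ (c : String) (n : Int), pvRuns c n l ≠ [] := by
  induction l with
  | nil => intro c n; simp [pvRuns]
  | cons v rest ih =>
    intro c n
    by_cases hv : v = c
    · rw [hv]
      simp only [pvRuns, beq_self_eq_true, if_true]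
      exact ih c (n + 1)
    · simp [pvRuns, hv]

-- run keys are strictly increasing when the scanned list is sorted and ≥ cur
theorem keys_pvRuns_pairwise (l : List String) : ∀ (c : String) (n : Int),
    l.Pairwise (· ≤ ·) → (∀ x ∈ l, c ≤ x) →
    ((pvRuns c n l).map Prod.fst).Pairwise (· < ·) := by
  induction l with
  | nil => intro c n _ _; simp [pvRuns]
  | cons v rest ih =>
    intro c n hp hge
    have hrest : rest.Pairwise (· ≤ ·) := (List.pairwise_cons.mp hp).2
    have hvle : ∀ x ∈ rest, v ≤ x := (List.pairwise_cons.mp hp).1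
    by_cases hv : v = c
    · rw [hv]
      simp only [pvRuns, beq_self_eq_true, if_true]
      exact ih c (n + 1) hrest (by rw [← hv]; exact hvle)
    · have hcv : c < v := lt_of_le_of_ne (hge v List.mem_cons_self) (fun h => hv h.symm)
      simp only [pvRuns, beq_iff_eq, if_neg hv, List.map_cons]
      refine List.pairwise_cons.mpr ⟨?_, ih v 1 hrest hvle⟩
      intro k hk
      rcases (mem_keys_pvRuns rest v 1 k).mp hk with rfl | hk
      · exact hcv
      · exact lt_of_lt_of_le hcv (hvle k hk)

-- each run's length is the count of its name in the scanned list (plus the carried-in count for the head run)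
theorem snd_pvRuns (l : List String) : ∀ (c : String) (n : Int),
    l.Pairwise (· ≤ ·) → (∀ x ∈ l, c ≤ x) →
    ∀ p ∈ pvRuns c n l, p.2 = if p.1 = c then n + (l.count c : Int) else (l.count p.1 : Int) := by
  induction l with
  | nil =>
    intro c n _ _ p hmem
    simp only [pvRuns, List.mem_singleton] at hmem
    rw [hmem]
    simp
  | cons v rest ih =>
    intro c n hp hge p hmem
    have hrest : rest.Pairwise (· ≤ ·) := (List.pairwise_cons.mp hp).2
    have hvle : ∀ x ∈ rest, v ≤ x := (List.pairwise_cons.mp hp).1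
    by_cases hv : v = c
    · rw [hv] at hmem ⊢
      simp only [pvRuns, beq_self_eq_true, if_true] at hmem
      have hih := ih c (n + 1) hrest (by rw [← hv]; exact hvle) p hmem
      by_cases hpc : p.1 = c
      · simp only [hpc, if_true, List.count_cons_self] at hih ⊢
        rw [hih]; push_cast; ring
      · simp only [hpc, if_false] at hih ⊢
        rw [hih]
        have hpc' : ¬ c = p.1 := fun hh => hpc hh.symm
        simp [hpc']
    · have hcv : c < v := lt_of_le_of_ne (hge v List.mem_cons_self) (fun h => hv h.symm)
      have hcnot : ¬ c ∈ v :: rest := by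
        intro hc
        rcases List.mem_cons.mp hc with rfl | hc
        · exact absurd rfl (ne_of_gt hcv)
        · exact absurd rfl (ne_of_gt (lt_of_lt_of_le hcv (hvle c hc)))
      simp only [pvRuns, beq_iff_eq, if_neg hv] at hmem
      rcases List.mem_cons.mp hmem with rfl | hmem
      · simp [List.count_eq_zero_of_not_mem hcnot]
      · have hih := ih v 1 hrest hvle p hmem
        have hpkey : p.1 = v ∨ p.1 ∈ rest := by
          have hmm : p.1 ∈ (pvRuns v 1 rest).map Prod.fst := List.mem_map.mpr ⟨p, hmem, rfl⟩
          exact (mem_keys_pvRuns rest v 1 p.1).mp hmm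
        have hpc : p.1 ≠ c := by
          rcases hpkey with hk | hk
          · rw [hk]; exact ne_of_gt hcv
          · exact ne_of_gt (lt_of_lt_of_le hcv (hvle _ hk))
        simp only [hpc, if_false]
        by_cases hpv : p.1 = v
        · simp only [hpv, if_true] at hih
          rw [hih, hpv, List.count_cons_self]; push_cast; ring
        · simp only [hpv, if_false] at hih
          rw [hih]
          have hpv' : ¬ v = p.1 := fun hh => hpv hh.symm
          simp [hpv']

-- bundled facts about B's runs list for s = sorted(votes) = h :: t
theorem runs_facts (votes : List String) (h : String) (t : List String)
    (hs : PySem.List.sorted votes (fun x => x) false = h :: t) :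
    (∀ k, k ∈ (pvRuns h 0 (h :: t)).map Prod.fst ↔ k ∈ votes) ∧
    (∀ p ∈ pvRuns h 0 (h :: t), p.2 = (votes.count p.1 : Int)) ∧
    ((pvRuns h 0 (h :: t)).map Prod.fst).Pairwise (· < ·) := by
  have hsorted : (h :: t).Pairwise (fun a b => a ≤ b) := by
    have := PySem.List.sorted_pairwise votes (fun x => x)
    rw [hs] at this
    exact this
  have hge : ∀ x ∈ h :: t, h ≤ x := by
    intro x hx
    rcases List.mem_cons.mp hx with rfl | hx
    · exact le_refl x
    · exact (List.pairwise_cons.mp hsorted).1 x hx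
  have hcount : ∀ k, (h :: t).count k = votes.count k := by
    intro k
    have : (PySem.List.sorted votes (fun x => x) false).Perm votes := PySem.List.sorted_perm _ _ _
    rw [hs] at this
    exact this.count_eq k
  refine ⟨?_, ?_, ?_⟩
  · intro k
    rw [mem_keys_pvRuns]
    have hmem : k ∈ h :: t ↔ k ∈ votes := by
      rw [← hs]; exact PySem.List.mem_sorted _ _ _ _
    constructor
    · rintro (rfl | hk)
      · exact hmem.mp List.mem_cons_self
      · exact hmem.mp hk
    · intro hk
      exact Or.inr (hmem.mpr hk)
  · intro p hp
    have := snd_pvRuns (h :: t) h 0 hsorted hge p hp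
    by_cases hph : p.1 = h
    · rw [this]
      simp only [if_true, ← hcount, hph]
      ring
    · rw [this]
      simp [hph, hcount]
  · exact keys_pvRuns_pairwise (h :: t) h 0 hsorted hge

-- A's top_count equals B's best: both are the maximum of the multiset of counts.
theorem top_eq_best (votes : List String) (hne : votes ≠ []) (h : String) (t : List String)
    (hs : PySem.List.sorted votes (fun x => x) false = h :: t) :
    ((PySem.List.sorted (PySem.Dict.counter votes).items (fun p => p.2) true).headD ("", 0)).2
      = (PySem.List.max? ((pvRuns h 0 (h :: t)).map (fun p => p.2)) (fun y => y)).getD 0 := by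
  obtain ⟨hkeys, hsnd, _⟩ := runs_facts votes h t hs
  rw [PySem.Dict.items_counter]
  have hS : PySem.Set.ofList votes ≠ [] := by
    intro hnil
    rcases List.exists_mem_of_ne_nil votes hne with ⟨v, hv⟩
    have := (PySem.Set.mem_ofList votes v).mpr hv
    simp [hnil] at this
  have hitems : (PySem.Set.ofList votes).map (fun k => (k, (List.count k votes : Int))) ≠ [] := by
    simpa using hS
  obtain ⟨m, tl, hsort⟩ :=
    List.exists_cons_of_ne_nil (l := PySem.List.sorted ((PySem.Set.ofList votes).map (fun k => (k, (List.count k votes : Int)))) (fun p => p.2) true)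
      (by rw [Ne, PySem.List.sorted_eq_nil_iff]; exact hitems)
  have hrunsne : (pvRuns h 0 (h :: t)).map (fun p => p.2) ≠ [] := by
    simp [pvRuns_ne_nil]
  obtain ⟨M, hM⟩ : ∃ M, PySem.List.max? ((pvRuns h 0 (h :: t)).map (fun p => p.2)) (fun y => y) = some M := by
    cases hmax : PySem.List.max? ((pvRuns h 0 (h :: t)).map (fun p => p.2)) (fun y => y) with
    | none => exact absurd ((PySem.List.max?_eq_none_iff _ _).mp hmax) hrunsne
    | some M => exact ⟨M, rfl⟩
  rw [hsort, hM]
  simp only [List.headD_cons, Option.getD_some]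
  -- m is (name, votes.count name) with name ∈ votes
  have hmmem : m ∈ (PySem.Set.ofList votes).map (fun k => (k, (List.count k votes : Int))) :=
    (PySem.List.mem_sorted _ _ true m).mp (hsort ▸ List.mem_cons_self)
  obtain ⟨k, hk, hkm⟩ := List.mem_map.mp hmmem
  have hkv : k ∈ votes := (PySem.Set.mem_ofList votes k).mp hk
  -- M is some run's length, i.e. some vote's count
  obtain ⟨p, hpR, hpM⟩ := List.mem_map.mp (PySem.List.max?_mem hM)
  have hpv : p.1 ∈ votes := (hkeys p.1).mp (List.mem_map.mpr ⟨p, hpR, rfl⟩)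
  have h1 : m.2 ≤ M := by
    -- m.2 = votes.count k, and some run has key k, whose length votes.count k is ≤ M
    obtain ⟨q, hqR, hqk⟩ := List.mem_map.mp ((hkeys k).mpr hkv)
    have hq2 : q.2 = (votes.count k : Int) := by rw [hsnd q hqR, hqk]
    have : q.2 ≤ M := by
      have : q.2 ∈ (pvRuns h 0 (h :: t)).map (fun p => p.2) := List.mem_map.mpr ⟨q, hqR, rfl⟩
      exact PySem.List.max?_isMax hM _ this
    calc m.2 = (votes.count k : Int) := by rw [← hkm]
    _ = q.2 := hq2.symm
    _ ≤ M := this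
  have h2 : M ≤ m.2 := by
    have hmemv : (p.1, (List.count p.1 votes : Int)) ∈ (PySem.Set.ofList votes).map (fun k => (k, (List.count k votes : Int))) :=
      List.mem_map.mpr ⟨p.1, (PySem.Set.mem_ofList votes p.1).mpr hpv, rfl⟩
    have hle := PySem.List.key_head_sorted_rev_ge _ (fun p => p.2) hsort _ hmemv
    have : M = (List.count p.1 votes : Int) := by rw [← hpM, hsnd p hpR]
    simpa [← this] using hle
  exact le_antisymm h1 h2

-- A's winners list equals B's winners list (for any threshold t0).
theorem winners_eq (votes : List String) (h : String) (t : List String)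
    (hs : PySem.List.sorted votes (fun x => x) false = h :: t) (t0 : Int) :
    PySem.List.sorted (((PySem.Dict.counter votes).items.filter (fun p => p.2 == t0)).map Prod.fst) (fun x => x) false
      = ((pvRuns h 0 (h :: t)).filter (fun p => p.2 == t0)).map Prod.fst := by
  obtain ⟨hkeys, hsnd, hpair⟩ := runs_facts votes h t hs
  set W := ((pvRuns h 0 (h :: t)).filter (fun p => p.2 == t0)).map Prod.fst with hW
  -- W is strictly increasing (a sublist of the strictly increasing keys list)
  have hWsub : W.Sublist ((pvRuns h 0 (h :: t)).map Prod.fst) :=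
    List.Sublist.map Prod.fst List.filter_sublist
  have hWpair : W.Pairwise (· < ·) := hpair.sublist hWsub
  have hWnodup : W.Nodup := hWpair.imp ne_of_lt
  -- membership in W
  have hWmem : ∀ k, k ∈ W ↔ k ∈ votes ∧ ((votes.count k : Int) == t0) = true := by
    intro k
    constructor
    · intro hk
      obtain ⟨p, hpf, rfl⟩ := List.mem_map.mp hk
      obtain ⟨hpR, hpt⟩ := List.mem_filter.mp hpf
      refine ⟨(hkeys p.1).mp (List.mem_map.mpr ⟨p, hpR, rfl⟩), ?_⟩
      rw [← hsnd p hpR]; exact hpt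
    · rintro ⟨hkv, hkt⟩
      obtain ⟨p, hpR, hpk⟩ := List.mem_map.mp ((hkeys k).mpr hkv)
      refine List.mem_map.mpr ⟨p, List.mem_filter.mpr ⟨hpR, ?_⟩, hpk⟩
      rw [hsnd p hpR, hpk]; exact hkt
  -- A's pre-sort list is the distinct names with count t0
  have heq : (((PySem.Set.ofList votes).filter ((fun p => p.2 == t0) ∘ fun k => (k, (List.count k votes : Int)))).map
      ((Prod.fst ∘ fun k => (k, (List.count k votes : Int))))) =
      ((PySem.Set.ofList votes).filter (fun k => ((List.count k votes : Int) == t0))) := by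
    simp only [Function.comp_def]
    exact List.map_id _ ▸ rfl
  rw [PySem.Dict.items_counter, List.filter_map, List.map_map, heq]
  refine PySem.List.sorted_eq_of_perm_of_pairwise_lt _ _ _ ?_ hWpair
  rw [List.perm_ext_iff_of_nodup hWnodup ((PySem.Set.nodup_ofList votes).filter _)]
  intro a
  rw [hWmem a, List.mem_filter, PySem.Set.mem_ofList]

-- ===== VERDICT (by name: the statement is the Claim_ definition above) =====
theorem pick_winner_py_spec : Claim_equal_pick_winner_py := by
  intro votes _
  unfold Spec_pick_winner_py pick_winner_py pick_winner_py_alt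
  by_cases h : votes = []
  · simp [h]
  · simp only [h]
    obtain ⟨hd, tl, hs⟩ :=
      List.exists_cons_of_ne_nil (l := PySem.List.sorted votes (fun x => x) false)
        (by rw [Ne, PySem.List.sorted_eq_nil_iff]; exact h)
    rw [hs]
    simp only [List.headD_cons]
    rw [top_eq_best votes h hd tl hs, winners_eq votes hd tl hs]
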